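-- pv_equiv track=rewrite | github.com/pornopatsan/dvm-snapshot-r6603-fork | dvm_sys/Correctness/run_tests.py | generate_grids
-- ===== SOURCE A (Python) =====
-- def generate_grids(max_proc_count, max_dim_count, exact_dims=True):
--     if max_dim_count == 1:
--         for i in range(1 + int(exact_dims == True),  min(3 + 1, max_proc_count + 1)):
--             yield (i,)
--     elif max_dim_count > 1:
--         for i in range(1,  min(3 + 1, max_proc_count + 1)):
--             for grid_suffix in generate_grids(max_proc_count // i, max_dim_count - 1):
--                 yield (i, *grid_suffix)
--     else:
--         raise RuntimeError(f'max_proc_count {max_proc_count} < 0')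
-- ===== SOURCE B (Python) =====
-- def generate_grids(max_proc_count, max_dim_count, exact_dims=True):
--     # Breadth-first: expand one grid dimension per level instead of recursing.
--     if max_dim_count <= 0:
--         raise RuntimeError(f'max_proc_count {max_proc_count} < 0')
--     states = [((), max_proc_count)]
--     for _ in range(max_dim_count - 1):
--         if not states:
--             break
--         states = [(p + (i,), r // i)
--                   for p, r in states
--                   for i in range(1, min(3, r) + 1)]
--     start = 2 if (exact_dims or max_dim_count > 1) else 1
--     for p, r in states:
--         for i in range(start, min(3, r) + 1):
--             yield p + (i,)
-- ===== Notes on version B (the rewrite author's own statement) =====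
-- stated objective: alternative
-- what changed: Replaced A's recursive generator by an iterative breadth-first expansion: a worklist of (prefix, remaining_proc) states is expanded one dimension per level, and the last dimension is emitted in a final pass with the start index (2, or 1 when max_dim_count==1 and not exact_dims) computed once up front.
import Mathlib
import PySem

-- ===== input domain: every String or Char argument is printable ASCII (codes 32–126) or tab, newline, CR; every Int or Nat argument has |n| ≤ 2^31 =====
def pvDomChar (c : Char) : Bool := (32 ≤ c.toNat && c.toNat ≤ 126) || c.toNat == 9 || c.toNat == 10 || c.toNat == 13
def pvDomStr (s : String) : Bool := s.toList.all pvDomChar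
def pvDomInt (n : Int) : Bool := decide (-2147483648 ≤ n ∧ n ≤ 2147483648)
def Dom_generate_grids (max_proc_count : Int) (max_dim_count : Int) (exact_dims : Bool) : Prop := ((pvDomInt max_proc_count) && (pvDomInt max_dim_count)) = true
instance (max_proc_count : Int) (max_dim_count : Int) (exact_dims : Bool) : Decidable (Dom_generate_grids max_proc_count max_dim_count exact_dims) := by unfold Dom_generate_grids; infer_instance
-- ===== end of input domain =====

-- B replaces A's recursion by an iterative breadth-first level expansion (one pass per dimension); objective: simpler decomposition.
-- Both Pythons are generators; equivalence is about the materialised sequence of yields.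

-- ===== PORT A =====
-- Literal port of A's recursion; the `else` branch (max_dim_count < 1) raises RuntimeError in Python,
-- excluded by Pre_, here [].
def generate_grids (max_proc_count : Int) (max_dim_count : Int) (exact_dims : Bool) : List (List Int) :=
  if max_dim_count = 1 then
    (PySem.List.pyRange (1 + (if exact_dims = true then (1:Int) else 0)) (min (3 + 1) (max_proc_count + 1)) 1).map
      (fun i => [i])
  else if h : max_dim_count > 1 then
    (PySem.List.pyRange 1 (min (3 + 1) (max_proc_count + 1)) 1).flatMap
      (fun i => (generate_grids (PySem.Int.floordiv max_proc_count i) (max_dim_count - 1) true).map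
        (fun s => i :: s))
  else []
termination_by max_dim_count.toNat
decreasing_by omega

-- ===== PORT B =====
-- B-side helpers: the two comprehensions of Source B as named functions.
def ggStep (S : List (List Int × Int)) : List (List Int × Int) :=
  S.flatMap (fun pr => (PySem.List.pyRange 1 (min 3 pr.2 + 1) 1).map
    (fun i => (pr.1 ++ [i], PySem.Int.floordiv pr.2 i)))

def ggFin (start : Int) (S : List (List Int × Int)) : List (List Int) :=
  S.flatMap (fun pr => (PySem.List.pyRange start (min 3 pr.2 + 1) 1).map (fun i => pr.1 ++ [i]))

-- Source B's level loop: run ggStep (max_dim_count - 1) times, breaking early once states is empty.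
def ggLevels : Nat → List (List Int × Int) → List (List Int × Int)
  | 0, S => S
  | n + 1, S => if S = [] then S else ggLevels n (ggStep S)

-- The mdc ≤ 0 branch raises RuntimeError in Python (excluded by Pre_), here [].
def generate_grids_alt (max_proc_count : Int) (max_dim_count : Int) (exact_dims : Bool) : List (List Int) :=
  if max_dim_count ≤ 0 then []
  else
    ggFin (if exact_dims || max_dim_count > 1 then 2 else 1)
      (ggLevels (max_dim_count - 1).toNat [(([] : List Int), max_proc_count)])

-- ===== PRECONDITION & SPEC =====
-- Pre_ excludes exactly max_dim_count ≤ 0, where both Pythons raise RuntimeError.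
def Pre_generate_grids (max_proc_count : Int) (max_dim_count : Int) (exact_dims : Bool) : Prop :=
  1 ≤ max_dim_count
instance (max_proc_count : Int) (max_dim_count : Int) (exact_dims : Bool) : Decidable (Pre_generate_grids max_proc_count max_dim_count exact_dims) := by unfold Pre_generate_grids; infer_instance

def pvWitness_generate_grids : Int × Int × Bool := (7, 2, true)

def Spec_generate_grids (max_proc_count : Int) (max_dim_count : Int) (exact_dims : Bool) (out : List (List Int)) : Prop := out = generate_grids_alt max_proc_count max_dim_count exact_dims
instance (max_proc_count : Int) (max_dim_count : Int) (exact_dims : Bool) (out : List (List Int)) : Decidable (Spec_generate_grids max_proc_count max_dim_count exact_dims out) := by unfold Spec_generate_grids; infer_instance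

-- ===== CLAIM (what is proved, stated in full; the proofs are below) =====
def Claim_equal_generate_grids : Prop := ∀ (max_proc_count : Int) (max_dim_count : Int) (exact_dims : Bool), Dom_generate_grids max_proc_count max_dim_count exact_dims → Pre_generate_grids max_proc_count max_dim_count exact_dims → Spec_generate_grids max_proc_count max_dim_count exact_dims (generate_grids max_proc_count max_dim_count exact_dims)

-- ===== LEMMAS AND PROOFS =====

theorem ggStep_iter_nil (m : Nat) : ggStep^[m] ([] : List (List Int × Int)) = [] := by
  induction m with
  | zero => rfl
  | succ k ih => simp [Function.iterate_succ_apply, ggStep, ih]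

theorem ggStep_append (S T : List (List Int × Int)) : ggStep (S ++ T) = ggStep S ++ ggStep T := by
  simp [ggStep]

theorem ggStep_iter_append (n : Nat) (S T : List (List Int × Int)) :
    ggStep^[n] (S ++ T) = ggStep^[n] S ++ ggStep^[n] T := by
  induction n generalizing S T with
  | zero => rfl
  | succ m ih => simp [Function.iterate_succ_apply, ggStep_append, ih]

theorem ggFin_append (st : Int) (S T : List (List Int × Int)) :
    ggFin st (S ++ T) = ggFin st S ++ ggFin st T := by
  simp [ggFin]

theorem ggLevels_eq_iter (n : Nat) (S : List (List Int × Int)) : ggLevels n S = ggStep^[n] S := by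
  induction n generalizing S with
  | zero => rfl
  | succ m ih =>
      by_cases h : S = []
      · subst h; simp [ggLevels, ggStep_iter_nil]
      · simp [ggLevels, h, ih, Function.iterate_succ_apply]

theorem ggFin_iter_map (st : Int) (m : Nat) (g : Int → List Int × Int) :
    ∀ (l : List Int), ggFin st (ggStep^[m] (l.map g)) = l.flatMap (fun i => ggFin st (ggStep^[m] [g i])) := by
  intro l
  induction l with
  | nil => simp [ggStep_iter_nil, ggFin]
  | cons a l ih =>
      have : (a :: l).map g = [g a] ++ l.map g := by simp
      rw [this, ggStep_iter_append, ggFin_append, ih]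
      simp

theorem gg_key (n : Nat) : ∀ (p : List Int) (r : Int) (ed : Bool),
    ggFin (if n = 0 && !ed then 1 else 2) (ggStep^[n] [(p, r)]) =
      (generate_grids r ((n : Int) + 1) ed).map (fun s => p ++ s) := by
  induction n with
  | zero =>
      intro p r ed
      rw [generate_grids]
      have hmin : min 3 r + 1 = min (3 + 1) (r + 1) := by omega
      cases ed <;>
        simp [ggFin, List.map_map, hmin, Function.comp]
  | succ m ih =>
      intro p r ed
      rw [generate_grids]
      rw [if_neg (show ¬ (((m : Nat) + 1 : Nat) : Int) + 1 = 1 by push_cast; omega),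
          dif_pos (show ((((m : Nat) + 1 : Nat) : Int) + 1 > 1) by push_cast; omega)]
      have hstart : (if m + 1 = 0 && !ed then (1:Int) else 2) = 2 := by simp
      rw [hstart, Function.iterate_succ_apply]
      have hstep : ggStep [(p, r)] =
          (PySem.List.pyRange 1 (min 3 r + 1) 1).map
            (fun i => (p ++ [i], PySem.Int.floordiv r i)) := by
        simp [ggStep]
      rw [hstep, ggFin_iter_map]
      have hmin : min 3 r + 1 = min (3 + 1) (r + 1) := by omega
      rw [hmin]
      rw [List.map_flatMap]
      apply List.flatMap_congr
      intro i _
      have := ih (p ++ [i]) (PySem.Int.floordiv r i) true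
      have hst : (if m = 0 && !true then (1:Int) else 2) = 2 := by simp
      rw [hst] at this
      simp only [show ((((m : Nat) + 1 : Nat) : Int) + 1 - 1) = (m : Int) + 1 by push_cast; ring]
      rw [this]
      simp [List.map_map, Function.comp]

theorem generate_grids_spec : Claim_equal_generate_grids := by
  intro mpc mdc ed _ hpre
  unfold Spec_generate_grids
  obtain ⟨n, hn⟩ : ∃ n : Nat, mdc = (n : Int) + 1 :=
    ⟨(mdc - 1).toNat, by unfold Pre_generate_grids at hpre; omega⟩
  subst hn
  unfold generate_grids_alt
  rw [if_neg (by omega), ggLevels_eq_iter]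
  have hlen : (((n : Int) + 1 - 1).toNat) = n := by omega
  rw [hlen]
  have hstart : (if ed || (n : Int) + 1 > 1 then (2:Int) else 1) =
      (if n = 0 && !ed then 1 else 2) := by
    cases ed <;> rcases Nat.eq_zero_or_pos n with h | h
    all_goals (simp_all; try omega)
  rw [hstart, gg_key n [] mpc ed]
  simp
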